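-- pv_equiv track=rewrite | github.com/Fondamenti18/fondamenti-di-programmazione | students/1810997/homework04/program01.py | st
-- ===== SOURCE A (Python) =====
-- def st(x,d2,d):# x indice da cercare, d2 dizionario vuoto , d dizionario da usare nella ricerca
--     if x in d:
--         figli=d[x]
--         d2[x]=figli
--         if figli!='[]':
--             for figlio in figli:
--                 d2=st(figlio,d2,d)
--             return d2
--         else:
--             return d2
--     else:
--         return d2
-- ===== SOURCE B (Python) =====
-- def st(x, d2, d):
--     # Two staged passes instead of one recursive in-place copy:
--     # stage 1 computes the preorder sequence of nodes reachable from x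
--     # (worklist; children pushed in reverse so pop order = A's recursion order),
--     # stage 2 copies the corresponding entries of d into d2.
--     order = []
--     stack = [x]
--     while stack:
--         node = stack.pop()
--         if node in d:
--             order.append(node)
--             stack.extend(reversed(d[node]))
--     for node in order:
--         d2[node] = d[node]
--     return d2
-- ===== Notes on version B (the rewrite author's own statement) =====
-- stated objective: alternative
-- what changed: The recursive in-place subtree copy is split into two staged passes: an iterative worklist traversal that first computes the preorder list of reachable keys, then a separate loop that copies those entries into d2; the always-true list-vs-string guard figli != '[]' is dropped.
import Mathlib
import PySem

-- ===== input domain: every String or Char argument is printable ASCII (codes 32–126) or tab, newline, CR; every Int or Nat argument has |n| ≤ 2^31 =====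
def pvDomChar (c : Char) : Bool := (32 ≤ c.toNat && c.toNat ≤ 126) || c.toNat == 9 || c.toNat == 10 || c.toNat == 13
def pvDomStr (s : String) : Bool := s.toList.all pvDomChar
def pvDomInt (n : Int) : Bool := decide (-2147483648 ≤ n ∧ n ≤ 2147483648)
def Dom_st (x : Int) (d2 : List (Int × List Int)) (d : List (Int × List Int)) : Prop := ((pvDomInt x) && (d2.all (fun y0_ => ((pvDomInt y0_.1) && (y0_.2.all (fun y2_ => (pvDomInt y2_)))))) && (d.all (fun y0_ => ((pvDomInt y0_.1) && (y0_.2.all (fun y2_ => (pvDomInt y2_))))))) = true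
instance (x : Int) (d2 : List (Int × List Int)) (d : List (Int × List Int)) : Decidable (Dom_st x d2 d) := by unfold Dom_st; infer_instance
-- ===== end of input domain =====

-- B splits A's recursive in-place subtree copy into two staged passes: a worklist
-- traversal computing the preorder list of reachable keys, then a loop copying those
-- entries into d2. Both Pythons mutate d2 in place and return it; the equivalence
-- proved here is about the returned dict.

-- ===== PORT A =====
-- Recursive copy, fuel-guarded for totality only: fuel d.length+1 bounds the
-- recursion depth on every input admitted by Pre_st (no cycle reachable from x).
def stA (fuel : Nat) (x : Int) (d2 : PySem.Dict Int (List Int)) (d : PySem.Dict Int (List Int)) : PySem.Dict Int (List Int) :=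
  match fuel with
  | 0 => d2
  | fuel + 1 =>
    match PySem.Dict.get? d x with        -- 'if x in d: figli = d[x]'
    | some figli =>
      -- 'd2[x] = figli'; the guard "figli != '[]'" compares a list with a string and is
      -- always True in Python, so the for-loop branch is always the one taken
      figli.foldl (fun acc figlio => stA fuel figlio acc d) (PySem.Dict.insert d2 x figli)
    | none => d2                          -- 'else: return d2'

def st (x : Int) (d2 : List (Int × List Int)) (d : List (Int × List Int)) : List (Int × List Int) :=
  (stA (d.length + 1) x (PySem.Dict.mk d2) (PySem.Dict.mk d)).items

-- ===== PORT B =====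
-- largest children-list length in d (used only to size B's loop fuel)
def Lmax (d : List (Int × List Int)) : Nat :=
  d.foldl (fun acc p => max acc p.2.length) 0

-- Stage 1 of Source B: the preorder list of visited keys. The Lean worklist keeps the
-- top at the HEAD, so Python's 'stack.extend(reversed(d[node]))' is 'figli ++ rest'.
-- fuel counts loop iterations (pops); it only guards totality.
def visits (fuel : Nat) (stack : List Int) (d : PySem.Dict Int (List Int)) : List Int :=
  match fuel with
  | 0 => []
  | fuel + 1 =>
    match stack with
    | [] => []
    | node :: rest =>
      match PySem.Dict.get? d node with
      | some figli => node :: visits fuel (figli ++ rest) d   -- 'order.append(node)'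
      | none => visits fuel rest d

-- Stage 2 of Source B: one step of 'for node in order: d2[node] = d[node]'
def copyStep (d : PySem.Dict Int (List Int)) (acc : PySem.Dict Int (List Int)) (node : Int) : PySem.Dict Int (List Int) :=
  match PySem.Dict.get? d node with
  | some figli => PySem.Dict.insert acc node figli
  | none => acc

-- (Lmax d + 2)^(d.length + 2) over-approximates the number of loop iterations on
-- every input admitted by Pre_st
def st_alt (x : Int) (d2 : List (Int × List Int)) (d : List (Int × List Int)) : List (Int × List Int) :=
  ((visits ((Lmax d + 2) ^ (d.length + 2)) [x] (PySem.Dict.mk d)).foldl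
      (copyStep (PySem.Dict.mk d)) (PySem.Dict.mk d2)).items

-- ===== PRECONDITION & SPEC =====
-- EnoughB n y d: every downward chain of d starting at y reaches a non-key of d
-- within n steps (a bounded-depth check of the children graph, not a run of either port)
def EnoughB (n : Nat) (y : Int) (d : PySem.Dict Int (List Int)) : Bool :=
  match n with
  | 0 => !(PySem.Dict.contains d y)
  | n + 1 =>
    match PySem.Dict.get? d y with
    | some figli => figli.all (fun c => EnoughB n c d)
    | none => true

-- Pre_st: exactly the inputs on which the Python A returns: no cycle of d is reachable
-- from x — equivalently (a chain cannot repeat a key without a cycle) every chain from x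
-- leaves the keys of d within d.length steps. On the excluded inputs A raises RecursionError.
def Pre_st (x : Int) (d2 : List (Int × List Int)) (d : List (Int × List Int)) : Prop :=
  EnoughB d.length x (PySem.Dict.mk d) = true
instance (x : Int) (d2 : List (Int × List Int)) (d : List (Int × List Int)) : Decidable (Pre_st x d2 d) := by unfold Pre_st; infer_instance

def pvWitness_st : Int × (List (Int × List Int)) × (List (Int × List Int)) :=
  (1, [], [(1, [2, 3]), (2, []), (3, [4])])

def Spec_st (x : Int) (d2 : List (Int × List Int)) (d : List (Int × List Int)) (out : List (Int × List Int)) : Prop := out = st_alt x d2 d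
instance (x : Int) (d2 : List (Int × List Int)) (d : List (Int × List Int)) (out : List (Int × List Int)) : Decidable (Spec_st x d2 d out) := by unfold Spec_st; infer_instance

-- ===== CLAIM (what is proved, stated in full; the proofs are below) =====
def Claim_equal_st : Prop := ∀ (x : Int) (d2 : List (Int × List Int)) (d : List (Int × List Int)), Dom_st x d2 d → Pre_st x d2 d → Spec_st x d2 d (st x d2 d)

-- ===== LEMMAS AND PROOFS =====

-- cost of A's recursion: number of calls (= loop iterations of B's stage 1)
def costA (fuel : Nat) (x : Int) (d : PySem.Dict Int (List Int)) : Nat :=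
  match fuel with
  | 0 => 1
  | fuel + 1 =>
    match PySem.Dict.get? d x with
    | some figli => 1 + (figli.map (fun c => costA fuel c d)).sum
    | none => 1

-- one-step unfolding lemmas (rw-friendly, avoid simp's nested unfolding)
theorem EnoughB_some (f : Nat) (y : Int) (d : PySem.Dict Int (List Int)) (figli : List Int)
    (hg : PySem.Dict.get? d y = some figli) :
    EnoughB (f + 1) y d = figli.all (fun c => EnoughB f c d) := by
  have h : EnoughB (f + 1) y d = match PySem.Dict.get? d y with
    | some figli => figli.all (fun c => EnoughB f c d)
    | none => true := rfl
  rw [h, hg]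

theorem EnoughB_none (f : Nat) (y : Int) (d : PySem.Dict Int (List Int))
    (hg : PySem.Dict.get? d y = none) : EnoughB (f + 1) y d = true := by
  have h : EnoughB (f + 1) y d = match PySem.Dict.get? d y with
    | some figli => figli.all (fun c => EnoughB f c d)
    | none => true := rfl
  rw [h, hg]

theorem stA_some (f : Nat) (y : Int) (d2 d : PySem.Dict Int (List Int)) (figli : List Int)
    (hg : PySem.Dict.get? d y = some figli) :
    stA (f + 1) y d2 d = figli.foldl (fun acc figlio => stA f figlio acc d) (PySem.Dict.insert d2 y figli) := by
  have h : stA (f + 1) y d2 d = match PySem.Dict.get? d y with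
    | some figli => figli.foldl (fun acc figlio => stA f figlio acc d) (PySem.Dict.insert d2 y figli)
    | none => d2 := rfl
  rw [h, hg]

theorem stA_none (f : Nat) (y : Int) (d2 d : PySem.Dict Int (List Int))
    (hg : PySem.Dict.get? d y = none) : stA (f + 1) y d2 d = d2 := by
  have h : stA (f + 1) y d2 d = match PySem.Dict.get? d y with
    | some figli => figli.foldl (fun acc figlio => stA f figlio acc d) (PySem.Dict.insert d2 y figli)
    | none => d2 := rfl
  rw [h, hg]

theorem costA_some (f : Nat) (y : Int) (d : PySem.Dict Int (List Int)) (figli : List Int)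
    (hg : PySem.Dict.get? d y = some figli) :
    costA (f + 1) y d = 1 + (figli.map (fun c => costA f c d)).sum := by
  have h : costA (f + 1) y d = match PySem.Dict.get? d y with
    | some figli => 1 + (figli.map (fun c => costA f c d)).sum
    | none => 1 := rfl
  rw [h, hg]

theorem costA_none (f : Nat) (y : Int) (d : PySem.Dict Int (List Int))
    (hg : PySem.Dict.get? d y = none) : costA (f + 1) y d = 1 := by
  have h : costA (f + 1) y d = match PySem.Dict.get? d y with
    | some figli => 1 + (figli.map (fun c => costA f c d)).sum
    | none => 1 := rfl
  rw [h, hg]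

theorem visits_cons_some (f : Nat) (node : Int) (rest : List Int) (d : PySem.Dict Int (List Int))
    (figli : List Int) (hg : PySem.Dict.get? d node = some figli) :
    visits (f + 1) (node :: rest) d = node :: visits f (figli ++ rest) d := by
  have h : visits (f + 1) (node :: rest) d = match PySem.Dict.get? d node with
    | some figli => node :: visits f (figli ++ rest) d
    | none => visits f rest d := rfl
  rw [h, hg]

theorem visits_cons_none (f : Nat) (node : Int) (rest : List Int) (d : PySem.Dict Int (List Int))
    (hg : PySem.Dict.get? d node = none) :
    visits (f + 1) (node :: rest) d = visits f rest d := by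
  have h : visits (f + 1) (node :: rest) d = match PySem.Dict.get? d node with
    | some figli => node :: visits f (figli ++ rest) d
    | none => visits f rest d := rfl
  rw [h, hg]

theorem copyStep_some (d : PySem.Dict Int (List Int)) (acc : PySem.Dict Int (List Int)) (node : Int)
    (figli : List Int) (hg : PySem.Dict.get? d node = some figli) :
    copyStep d acc node = PySem.Dict.insert acc node figli := by
  unfold copyStep; rw [hg]

theorem get?_none_of_enough_zero (d : PySem.Dict Int (List Int)) (y : Int)
    (h : EnoughB 0 y d = true) : PySem.Dict.get? d y = none := by
  simp only [EnoughB, Bool.not_eq_true'] at h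
  rw [PySem.Dict.contains_eq_isSome_get?] at h
  exact Option.not_isSome_iff_eq_none.mp (by simp [h])

theorem enough_mono (d : PySem.Dict Int (List Int)) :
    ∀ (f : Nat) (y : Int), EnoughB f y d = true → EnoughB (f + 1) y d = true := by
  intro f
  induction f with
  | zero =>
    intro y h
    rw [EnoughB_none 0 y d (get?_none_of_enough_zero d y h)]
  | succ f ih =>
    intro y h
    cases hg : PySem.Dict.get? d y with
    | none => rw [EnoughB_none _ y d hg]
    | some figli =>
      rw [EnoughB_some _ y d figli hg] at h ⊢
      simp only [List.all_eq_true] at h ⊢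
      exact fun c hc => ih c (h c hc)

theorem stA_stable (d : PySem.Dict Int (List Int)) :
    ∀ (f : Nat) (y : Int) (g : Nat) (d2 : PySem.Dict Int (List Int)),
      EnoughB f y d = true → f ≤ g → stA g y d2 d = stA f y d2 d := by
  intro f
  induction f with
  | zero =>
    intro y g d2 h _
    have hn := get?_none_of_enough_zero d y h
    cases g with
    | zero => rfl
    | succ g => rw [stA_none g y d2 d hn]; rfl
  | succ f ih =>
    intro y g d2 h hle
    cases g with
    | zero => omega
    | succ g =>
      cases hg : PySem.Dict.get? d y with
      | none => rw [stA_none g y d2 d hg, stA_none f y d2 d hg]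
      | some figli =>
        rw [EnoughB_some f y d figli hg, List.all_eq_true] at h
        rw [stA_some g y d2 d figli hg, stA_some f y d2 d figli hg]
        refine PySem.List.foldl_congr_mem _ _ _ _ ?_
        intro acc c hc
        rw [ih c g acc (h c hc) (by omega)]

theorem costA_stable (d : PySem.Dict Int (List Int)) :
    ∀ (f : Nat) (y : Int) (g : Nat),
      EnoughB f y d = true → f ≤ g → costA g y d = costA f y d := by
  intro f
  induction f with
  | zero =>
    intro y g h _
    have hn := get?_none_of_enough_zero d y h
    cases g with
    | zero => rfl
    | succ g => rw [costA_none g y d hn]; rfl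
  | succ f ih =>
    intro y g h hle
    cases g with
    | zero => omega
    | succ g =>
      cases hg : PySem.Dict.get? d y with
      | none => rw [costA_none g y d hg, costA_none f y d hg]
      | some figli =>
        rw [EnoughB_some f y d figli hg, List.all_eq_true] at h
        rw [costA_some g y d figli hg, costA_some f y d figli hg]
        congr 1
        refine congrArg List.sum (List.map_congr_left ?_)
        intro c hc
        rw [ih c g (h c hc) (by omega), ih c f (h c hc) le_rfl]

theorem val_len_le_Lmax (d : List (Int × List Int)) (y : Int) (l : List Int)
    (h : PySem.Dict.get? (PySem.Dict.mk d) y = some l) : l.length ≤ Lmax d := by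
  have hmem : (y, l) ∈ (PySem.Dict.mk d).items := PySem.Dict.mem_items_of_get?_eq_some _ h
  exact (PySem.List.le_foldl_max_nat d (fun p => p.2.length) 0).2 _ hmem

theorem costA_le (d : List (Int × List Int)) :
    ∀ (f : Nat) (y : Int), costA f y (PySem.Dict.mk d) ≤ (Lmax d + 2) ^ f := by
  intro f
  induction f with
  | zero => intro y; simp [costA]
  | succ f ih =>
    intro y
    cases hg : PySem.Dict.get? (PySem.Dict.mk d) y with
    | none =>
      rw [costA_none f y _ hg]
      exact Nat.one_le_pow _ _ (by omega)
    | some figli =>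
      rw [costA_some f y _ figli hg]
      have hsum : (figli.map (fun c => costA f c (PySem.Dict.mk d))).sum
          ≤ figli.length * (Lmax d + 2) ^ f := by
        calc (figli.map (fun c => costA f c (PySem.Dict.mk d))).sum
            ≤ (figli.map (fun c => costA f c (PySem.Dict.mk d))).length • ((Lmax d + 2) ^ f) :=
              List.sum_le_card_nsmul _ _ (by
                intro v hv
                obtain ⟨c, _, rfl⟩ := List.mem_map.mp hv
                exact ih c)
          _ = figli.length * (Lmax d + 2) ^ f := by simp [smul_eq_mul]
      have hlen : figli.length ≤ Lmax d := val_len_le_Lmax d y figli hg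
      have hpow : 1 ≤ (Lmax d + 2) ^ f := Nat.one_le_pow _ _ (by omega)
      have hmul : figli.length * (Lmax d + 2) ^ f ≤ Lmax d * (Lmax d + 2) ^ f :=
        Nat.mul_le_mul_right _ hlen
      calc 1 + (figli.map (fun c => costA f c (PySem.Dict.mk d))).sum
          ≤ 1 + Lmax d * (Lmax d + 2) ^ f := by omega
        _ ≤ (Lmax d + 2) ^ (f + 1) := by rw [pow_succ]; nlinarith

-- the bridge: folding the copy step over B's visit list of a worklist equals
-- running A's recursion on each entry of the worklist in turn
theorem bridge (d : PySem.Dict Int (List Int)) (N : Nat) :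
    ∀ (fb : Nat) (stack : List Int) (d2 : PySem.Dict Int (List Int)),
      (∀ y ∈ stack, EnoughB N y d = true) →
      (stack.map (fun y => costA (N + 1) y d)).sum + 1 ≤ fb →
      (visits fb stack d).foldl (copyStep d) d2
        = stack.foldl (fun acc y => stA (N + 1) y acc d) d2 := by
  intro fb
  induction fb with
  | zero => intro stack d2 _ hc; omega
  | succ fb ih =>
    intro stack d2 hall hc
    cases stack with
    | nil => rfl
    | cons node rest =>
      have hnode := hall node (List.mem_cons_self ..)
      cases hg : PySem.Dict.get? d node with
      | none =>
        rw [visits_cons_none fb node rest d hg,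
            ih rest d2 (fun y hy => hall y (List.mem_cons_of_mem _ hy)) ?_]
        · rw [List.foldl_cons]
          cases N with
          | zero => rw [stA_none 0 node d2 d hg]
          | succ M => rw [stA_none (M + 1) node d2 d hg]
        · rw [List.map_cons, List.sum_cons] at hc
          cases N with
          | zero => rw [costA_none 0 node d hg] at hc; omega
          | succ M => rw [costA_none (M + 1) node d hg] at hc; omega
      | some figli =>
        cases N with
        | zero =>
          exact absurd hg (by rw [get?_none_of_enough_zero d node hnode]; simp)
        | succ M =>
          -- children of node satisfy EnoughB M, hence EnoughB (M+1)
          have hch : ∀ c ∈ figli, EnoughB M c d = true := by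
            rw [EnoughB_some M node d figli hg, List.all_eq_true] at hnode
            exact hnode
          have hch' : ∀ c ∈ figli, EnoughB (M + 1) c d = true :=
            fun c hc' => enough_mono d M c (hch c hc')
          have hall' : ∀ y ∈ figli ++ rest, EnoughB (M + 1) y d = true := by
            intro y hy
            rcases List.mem_append.mp hy with hy | hy
            · exact hch' y hy
            · exact hall y (List.mem_cons_of_mem _ hy)
          -- the cost of node is 1 + the costs of its children (at stabilised fuel)
          have hcost_node : costA (M + 1 + 1) node d
              = 1 + (figli.map (fun c => costA (M + 1 + 1) c d)).sum := by
            rw [costA_some (M + 1) node d figli hg]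
            congr 1
            refine congrArg List.sum (List.map_congr_left ?_)
            intro c hc'
            rw [costA_stable d M c (M + 1) (hch c hc') (by omega),
                costA_stable d M c (M + 1 + 1) (hch c hc') (by omega)]
          have hc' : ((figli ++ rest).map (fun y => costA (M + 1 + 1) y d)).sum + 1 ≤ fb := by
            rw [List.map_cons, List.sum_cons] at hc
            rw [List.map_append, List.sum_append]
            omega
          rw [visits_cons_some fb node rest d figli hg, List.foldl_cons,
              copyStep_some d d2 node figli hg,
              ih (figli ++ rest) (PySem.Dict.insert d2 node figli) hall' hc',
              List.foldl_append, List.foldl_cons]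
          -- stA (M+2) on node unfolds to a fold over figli at fuel M+1, which on each
          -- child equals fuel M+1+1 by stability
          have hunfold : stA (M + 1 + 1) node d2 d
              = figli.foldl (fun acc y => stA (M + 1 + 1) y acc d) (PySem.Dict.insert d2 node figli) := by
            rw [stA_some (M + 1) node d2 d figli hg]
            refine PySem.List.foldl_congr_mem _ _ _ _ ?_
            intro acc c hc''
            exact (stA_stable d (M + 1) c (M + 1 + 1) acc (hch' c hc'') (by omega)).symm
          rw [hunfold]

-- ===== VERDICT (by name: the statement is the Claim_ definition above) =====
theorem st_spec : Claim_equal_st := by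
  intro x d2 d _ pre
  unfold Spec_st st st_alt
  have hb := bridge (PySem.Dict.mk d) d.length ((Lmax d + 2) ^ (d.length + 2)) [x]
      (PySem.Dict.mk d2) (by intro y hy; simp only [List.mem_singleton] at hy; subst hy; exact pre) ?_
  · rw [hb, List.foldl_cons, List.foldl_nil]
  · have h1 : costA (d.length + 1) x (PySem.Dict.mk d) ≤ (Lmax d + 2) ^ (d.length + 1) :=
      costA_le d (d.length + 1) x
    have h2 : (Lmax d + 2) ^ (d.length + 2) = (Lmax d + 2) ^ (d.length + 1) * (Lmax d + 2) := by
      rw [← pow_succ]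
    have h3 : 1 ≤ (Lmax d + 2) ^ (d.length + 1) := Nat.one_le_pow _ _ (by omega)
    simp only [List.map_cons, List.map_nil, List.sum_cons, List.sum_nil]
    nlinarith
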